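-- pv_equiv track=rewrite | github.com/kimhaggie/Coding_practice | BOJ_1891.py | find_loc
-- ===== SOURCE A (Python) =====
-- def find_loc(pos):
--     d = pow(2,len(pos))
--     cur = pos[0]
--     if d == 2:
--         if cur=='1':
--             return [1,1]
--         elif cur=='2':
--             return [-1,1]
--         elif cur=='3':
--             return [-1,-1]
--         else:
--             return [1,-1]
--     else:
--         if cur=='1':
--             x = [d//2,d//2]
--             y = find_loc(pos[1:])
--             return [x[0]+y[0],x[1]+y[1]]
--         elif cur=='2':
--             x = [-d//2,d//2]
--             y = find_loc(pos[1:])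
--             return [x[0]+y[0],x[1]+y[1]]
--         elif cur=='3':
--             x = [-d//2,-d//2]
--             y = find_loc(pos[1:])
--             return [x[0]+y[0],x[1]+y[1]]
--         else:
--             x = [d//2,-d//2]
--             y = find_loc(pos[1:])
--             return [x[0]+y[0],x[1]+y[1]]
-- ===== SOURCE B (Python) =====
-- def find_loc(pos):
--     x = y = 0
--     scale = 1 << (len(pos) - 1)
--     for c in pos:
--         if c == '1':
--             x += scale; y += scale
--         elif c == '2':
--             x -= scale; y += scale
--         elif c == '3':
--             x -= scale; y -= scale
--         else:
--             x += scale; y -= scale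
--         scale //= 2
--     return [x, y]
-- ===== Notes on version B (the rewrite author's own statement) =====
-- stated objective: alternative
-- what changed: Replaced A's recursion that recomputes pow(2,len) and slices the string at every level with a single left-to-right pass accumulating x,y offsets while halving a scale variable.
-- outside the precondition, e.g. on find_loc(''): A raises IndexError, B raises ValueError
import Mathlib
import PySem

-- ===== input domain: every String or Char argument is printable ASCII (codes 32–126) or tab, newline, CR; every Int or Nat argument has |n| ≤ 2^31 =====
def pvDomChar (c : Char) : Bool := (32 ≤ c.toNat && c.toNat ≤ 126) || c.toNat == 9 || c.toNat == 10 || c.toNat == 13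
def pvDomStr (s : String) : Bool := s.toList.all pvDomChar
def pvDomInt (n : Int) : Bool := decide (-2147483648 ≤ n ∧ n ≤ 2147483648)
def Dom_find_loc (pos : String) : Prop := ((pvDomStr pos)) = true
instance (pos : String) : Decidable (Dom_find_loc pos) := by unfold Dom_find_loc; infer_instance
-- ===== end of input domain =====

-- B computes the coordinates in one left-to-right pass with a halving scale instead of A's recursion with pow and slicing per level.

-- ===== PORT A =====
-- literal transliteration of A's recursion on the character list (pos[1:] = tail);
-- the [] case is unreachable under Pre_find_loc (Python raises IndexError on "").
def find_locAuxA : List Char → List Int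
  | [] => []
  | cur :: rest =>
    let d : Int := 2 ^ (cur :: rest).length
    if d = 2 then
      if cur = '1' then [1, 1]
      else if cur = '2' then [-1, 1]
      else if cur = '3' then [-1, -1]
      else [1, -1]
    else
      if cur = '1' then
        let x : List Int := [PySem.Int.floordiv d 2, PySem.Int.floordiv d 2]
        let y := find_locAuxA rest
        [x.getD 0 0 + y.getD 0 0, x.getD 1 0 + y.getD 1 0]
      else if cur = '2' then
        let x : List Int := [PySem.Int.floordiv (-d) 2, PySem.Int.floordiv d 2]
        let y := find_locAuxA rest
        [x.getD 0 0 + y.getD 0 0, x.getD 1 0 + y.getD 1 0]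
      else if cur = '3' then
        let x : List Int := [PySem.Int.floordiv (-d) 2, PySem.Int.floordiv (-d) 2]
        let y := find_locAuxA rest
        [x.getD 0 0 + y.getD 0 0, x.getD 1 0 + y.getD 1 0]
      else
        let x : List Int := [PySem.Int.floordiv d 2, PySem.Int.floordiv (-d) 2]
        let y := find_locAuxA rest
        [x.getD 0 0 + y.getD 0 0, x.getD 1 0 + y.getD 1 0]

def find_loc (pos : String) : List Int := find_locAuxA pos.toList

-- ===== PORT B =====
-- one step of B's loop: add ±scale to x,y depending on c, then halve the scale
def find_locStepB (st : Int × Int × Int) (c : Char) : Int × Int × Int :=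
  let x := st.1
  let y := st.2.1
  let s := st.2.2
  let xy : Int × Int :=
    if c = '1' then (x + s, y + s)
    else if c = '2' then (x - s, y + s)
    else if c = '3' then (x - s, y - s)
    else (x + s, y - s)
  (xy.1, xy.2, PySem.Int.floordiv s 2)

def find_loc_alt (pos : String) : List Int :=
  let l := pos.toList
  let r := l.foldl find_locStepB (0, 0, (2 : Int) ^ (l.length - 1))
  [r.1, r.2.1]

-- ===== PRECONDITION & SPEC =====
-- Pre_ excludes only the empty string, on which both Pythons raise (A: IndexError, B: ValueError).
def Pre_find_loc (pos : String) : Prop := pos.toList ≠ []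
instance (pos : String) : Decidable (Pre_find_loc pos) := by unfold Pre_find_loc; infer_instance
def pvWitness_find_loc : String := "1324"

def Spec_find_loc (pos : String) (out : List Int) : Prop := out = find_loc_alt pos
instance (pos : String) (out : List Int) : Decidable (Spec_find_loc pos out) := by unfold Spec_find_loc; infer_instance

-- ===== CLAIM (what is proved, stated in full; the proofs are below) =====
def Claim_equal_find_loc : Prop := ∀ (pos : String), Dom_find_loc pos → Pre_find_loc pos → Spec_find_loc pos (find_loc pos)

-- ===== LEMMAS AND PROOFS =====

-- B's step adds offsets independent of the accumulated x,y, so the start shifts out additively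
theorem find_locStepB_shift (l : List Char) (a b s : Int) :
    l.foldl find_locStepB (a, b, s) =
      ((l.foldl find_locStepB (0, 0, s)).1 + a,
       (l.foldl find_locStepB (0, 0, s)).2.1 + b,
       (l.foldl find_locStepB (0, 0, s)).2.2) := by
  induction l generalizing a b s with
  | nil => simp
  | cons c t ih =>
    simp only [List.foldl_cons, find_locStepB]
    split_ifs
    · rw [ih (a + s) (b + s), ih (0 + s) (0 + s)]
      exact Prod.ext (by ring) (Prod.ext (by ring) rfl)
    · rw [ih (a - s) (b + s), ih (0 - s) (0 + s)]
      exact Prod.ext (by ring) (Prod.ext (by ring) rfl)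
    · rw [ih (a - s) (b - s), ih (0 - s) (0 - s)]
      exact Prod.ext (by ring) (Prod.ext (by ring) rfl)
    · rw [ih (a + s) (b - s), ih (0 + s) (0 - s)]
      exact Prod.ext (by ring) (Prod.ext (by ring) rfl)

theorem fdiv_pow_two (k : Nat) : PySem.Int.floordiv ((2 : Int) ^ (k + 1)) 2 = 2 ^ k := by
  rw [PySem.Int.floordiv_eq_ediv_of_pos (by omega), pow_succ]
  omega

theorem fdiv_neg_pow_two (k : Nat) :
    PySem.Int.floordiv (-((2 : Int) ^ (k + 1))) 2 = -(2 ^ k) := by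
  rw [PySem.Int.floordiv_eq_ediv_of_pos (by omega), pow_succ]
  omega

theorem find_loc_aux_eq (l : List Char) (h : l ≠ []) :
    find_locAuxA l =
      [(l.foldl find_locStepB (0, 0, (2 : Int) ^ (l.length - 1))).1,
       (l.foldl find_locStepB (0, 0, (2 : Int) ^ (l.length - 1))).2.1] := by
  induction l with
  | nil => exact absurd rfl h
  | cons c t ih =>
    cases t with
    | nil =>
      simp only [find_locAuxA, List.length_cons, List.length_nil, List.foldl_cons,
        List.foldl_nil, find_locStepB]
      norm_num
      split_ifs <;> simp
    | cons c2 t2 =>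
      have ht : c2 :: t2 ≠ [] := by simp
      have hIH := ih ht
      have hd2 : (2 : Int) ^ (t2.length + 1 + 1) ≠ 2 := by
        have h1 : (2:Int) ^ 1 < 2 ^ (t2.length + 1 + 1) :=
          pow_lt_pow_right₀ (by norm_num) (by omega)
        simpa using h1.ne'
      have hfd : PySem.Int.floordiv ((2:Int) ^ (t2.length + 1 + 1)) 2
          = (2:Int) ^ (t2.length + 1) := fdiv_pow_two _
      have hfdn : PySem.Int.floordiv (-((2:Int) ^ (t2.length + 1 + 1))) 2
          = -((2:Int) ^ (t2.length + 1)) := fdiv_neg_pow_two _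
      have hs' : PySem.Int.floordiv ((2:Int) ^ (t2.length + 1)) 2
          = (2:Int) ^ t2.length := fdiv_pow_two _
      rw [find_locAuxA.eq_2]
      simp only [List.length_cons, Nat.add_sub_cancel, if_neg hd2, hIH, List.getD,
        List.getElem?_cons_zero, List.getElem?_cons_succ, Option.getD_some, hfd, hfdn]
      generalize hq : List.foldl find_locStepB (0, 0, (2:Int) ^ t2.length) (c2 :: t2) = q
      rw [List.foldl_cons]
      simp only [find_locStepB, zero_add, zero_sub, hs']
      split_ifs <;>
        rw [find_locStepB_shift, hq] <;>
        simp only [List.cons.injEq, and_true] <;>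
        exact ⟨by ring, by ring⟩

-- ===== VERDICT (by name: the statement is the Claim_ definition above) =====
theorem find_loc_spec : Claim_equal_find_loc := by
  intro pos _ hpre
  unfold Spec_find_loc find_loc find_loc_alt
  exact find_loc_aux_eq pos.toList hpre
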